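-- pv_equiv track=rewrite | github.com/Dancesoul/leetcodebywhy | Solutions3.py | halfQuestions
-- ===== SOURCE A (Python) =====
-- from typing import List
--
-- import collections
--
-- def halfQuestions(questions: List[int]) -> int:
--     """
--     LCS 02. 完成一半题目
--     :param questions:
--     :return:
--     """
--     n = len(questions) // 2
--     c = collections.Counter(questions)
--     nums = 0
--     for key, value in c.most_common():
--         nums += 1
--         n -= value
--         if n <= 0:
--             return nums
--     return nums
-- ===== SOURCE B (Python) =====
-- from typing import List
--
-- import collections
--
-- def halfQuestions(questions: List[int]) -> int:
--     need = len(questions) // 2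
--     freq = collections.Counter(questions)
--     bucket = collections.Counter(freq.values())  # frequency -> how many question types occur that often
--     nums = 0
--     for f in sorted(bucket, reverse=True):
--         k = bucket[f]
--         if need > k * f:
--             # take all k types of this frequency and keep going
--             nums += k
--             need -= k * f
--         else:
--             # finish here: ceil(need / f) types suffice, and at least one type is
--             # always taken (need can be 0 only when there are fewer than 2 questions)
--             return nums + max(1, -(-need // f))
--     return nums
-- ===== Notes on version B (the rewrite author's own statement) =====
-- stated objective: alternative
-- what changed: Instead of sorting all (key,count) pairs via Counter.most_common() and subtracting one key per loop step, B builds a frequency-of-frequency Counter, sorts only the distinct frequencies descending, and consumes each frequency class in one arithmetic batch (ceiling division for the final class).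
import Mathlib
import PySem

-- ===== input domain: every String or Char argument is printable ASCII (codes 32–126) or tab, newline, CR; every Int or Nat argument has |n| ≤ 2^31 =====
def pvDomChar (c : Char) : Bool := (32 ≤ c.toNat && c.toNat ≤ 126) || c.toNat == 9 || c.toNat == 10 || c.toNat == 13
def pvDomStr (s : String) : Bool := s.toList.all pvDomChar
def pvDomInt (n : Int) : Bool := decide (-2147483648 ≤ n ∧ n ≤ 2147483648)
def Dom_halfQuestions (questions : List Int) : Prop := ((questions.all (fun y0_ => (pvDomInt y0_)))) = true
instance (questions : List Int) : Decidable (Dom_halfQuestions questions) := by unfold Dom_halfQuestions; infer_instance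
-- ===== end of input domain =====

-- B replaces the sort of all (key,count) pairs behind Counter.most_common() by a frequency-of-frequency
-- Counter whose distinct frequencies are sorted descending and consumed in arithmetic batches (objective: alternative).

-- ===== PORT A =====
-- the 'for key, value in c.most_common(): nums += 1; n -= value; if n <= 0: return nums' loop
def pvLoopA : List (Int × Int) → Int → Int → Int
  | [], _, nums => nums
  | (_, value) :: rest, n, nums =>
    if n - value ≤ 0 then nums + 1 else pvLoopA rest (n - value) (nums + 1)

def halfQuestions (questions : List Int) : Int :=
  let n : Int := PySem.Int.floordiv (questions.length : Int) 2
  let c := PySem.Dict.counter questions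
  -- c.most_common() = sorted(c.items(), key=itemgetter(1), reverse=True) (stable)
  pvLoopA (PySem.List.sorted c.items (fun p => p.2) true) n 0

-- ===== PORT B =====
-- the 'for f in sorted(bucket, reverse=True)' loop with its batch-take / finish branches
def pvOuterB : List Int → PySem.Dict Int Int → Int → Int → Int
  | [], _, _, nums => nums
  | f :: rest, bucket, need, nums =>
    let k := bucket.getD f 0
    if k * f < need then pvOuterB rest bucket (need - k * f) (nums + k)
    else nums + max 1 (-(PySem.Int.floordiv (-need) f))   -- nums + max(1, -(-need // f))

def halfQuestions_alt (questions : List Int) : Int :=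
  let need : Int := PySem.Int.floordiv (questions.length : Int) 2
  let freq := PySem.Dict.counter questions
  let bucket := PySem.Dict.counter freq.values
  pvOuterB (PySem.List.sorted bucket.keys (fun x => x) true) bucket need 0

-- ===== PRECONDITION & SPEC =====
def Spec_halfQuestions (questions : List Int) (out : Int) : Prop := out = halfQuestions_alt questions
instance (questions : List Int) (out : Int) : Decidable (Spec_halfQuestions questions out) := by unfold Spec_halfQuestions; infer_instance

-- ===== CLAIM (what is proved, stated in full; the proofs are below) =====
def Claim_equal_halfQuestions : Prop := ∀ (questions : List Int), Dom_halfQuestions questions → Spec_halfQuestions questions (halfQuestions questions)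

-- ===== LEMMAS AND PROOFS =====

-- common semantics: A's early-return loop as a function of the list of counts only
def pvRun : List Int → Int → Int → Int
  | [], _, nums => nums
  | v :: rest, n, nums =>
    if n - v ≤ 0 then nums + 1 else pvRun rest (n - v) (nums + 1)

theorem pvLoopA_eq_run (pairs : List (Int × Int)) (n nums : Int) :
    pvLoopA pairs n nums = pvRun (pairs.map (·.2)) n nums := by
  induction pairs generalizing n nums with
  | nil => rfl
  | cons p rest ih =>
    obtain ⟨k, v⟩ := p
    simp only [pvLoopA, List.map, pvRun]
    split <;> simp [ih]

-- one batch of B (k ≥ 1 keys, each of frequency f ≥ 1) against k steps of A's loop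
theorem pvStep (f : Int) (k : Nat) (need nums : Int) (ws : List Int)
    (hf : 1 ≤ f) (hk : 1 ≤ k) :
    pvRun (List.replicate k f ++ ws) need nums =
      if (k : Int) * f < need then pvRun ws (need - (k : Int) * f) (nums + (k : Int))
      else nums + max 1 (-(PySem.Int.floordiv (-need) f)) := by
  induction k generalizing need nums with
  | zero => omega
  | succ m ih =>
    simp only [List.replicate, List.cons_append, pvRun]
    by_cases hstop : need - f ≤ 0
    · -- A returns nums + 1 here; B's ceiling is at most 1
      have hnotlt : ¬ ((m + 1 : Nat) : Int) * f < need := by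
        push_cast; nlinarith
      have hceil : -(PySem.Int.floordiv (-need) f) ≤ 1 := by
        have := (PySem.Int.le_floordiv_iff_mul_le (a := -need) (b := f) (q := -1) (by omega)).mpr
          (by omega)
        omega
      rw [if_pos hstop, if_neg hnotlt, max_eq_left hceil]
    · -- A continues with need - f
      rw [if_neg hstop]
      rcases Nat.eq_zero_or_pos m with hm | hm
      · subst hm
        have hlt : ((0 + 1 : Nat) : Int) * f < need := by push_cast; omega
        rw [if_pos hlt]
        simp only [List.replicate, List.nil_append]
        push_cast
        ring_nf
      · rw [ih _ _ hm]
        have hiff : ((m : Int) * f < need - f) ↔ (((m + 1 : Nat) : Int) * f < need) := by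
          push_cast; constructor <;> intro <;> nlinarith
        by_cases hcase : (m : Int) * f < need - f
        · rw [if_pos hcase, if_pos (hiff.mp hcase)]
          congr 1 <;> push_cast <;> ring
        · rw [if_neg hcase, if_neg ((not_iff_not.mpr hiff).mp hcase)]
          -- nums + max 1 ⌈need/f⌉ = (nums + 1) + max 1 ⌈(need-f)/f⌉ when f < need
          have hshift : PySem.Int.floordiv (-need) f = PySem.Int.floordiv (-(need - f)) f - 1 := by
            rw [PySem.Int.floordiv_eq_ediv_of_pos (by omega),
                PySem.Int.floordiv_eq_ediv_of_pos (by omega)]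
            have := Int.add_mul_ediv_right (-(need - f)) (-1) (c := f) (by omega)
            have harg : -(need - f) + -1 * f = -need := by ring
            rw [harg] at this
            omega
          have hge1 : 1 ≤ -(PySem.Int.floordiv (-(need - f)) f) := by
            have := (PySem.Int.floordiv_lt_iff_lt_mul (a := -(need - f)) (b := f) (q := 0)
              (by omega)).mpr (by omega)
            omega
          rw [max_eq_right hge1, max_eq_right (by omega : (1:Int) ≤ -(PySem.Int.floordiv (-need) f))]
          omega

-- B's whole loop against A's loop run on the flattened count sequence
theorem pvOuterB_eq_run (fs : List Int) (bucket : PySem.Dict Int Int) (need nums : Int)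
    (h : ∀ f ∈ fs, 1 ≤ f ∧ 1 ≤ bucket.getD f 0) :
    pvOuterB fs bucket need nums =
      pvRun (fs.flatMap (fun f => List.replicate (bucket.getD f 0).toNat f)) need nums := by
  induction fs generalizing need nums with
  | nil => rfl
  | cons f rest ih =>
    obtain ⟨hf, hk⟩ := h f (List.mem_cons_self ..)
    have hcast : (((bucket.getD f 0).toNat : Nat) : Int) = bucket.getD f 0 :=
      Int.toNat_of_nonneg (by omega)
    simp only [List.flatMap_cons]
    rw [pvStep f (bucket.getD f 0).toNat need nums _ hf (by omega), hcast]
    simp only [pvOuterB]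
    split
    · exact ih _ _ (fun g hg => h g (List.mem_cons_of_mem _ hg))
    · rfl

-- counting in a flatMap of replicates over a nodup list of frequencies
theorem pvCount_flatMap_replicate (fs : List Int) (c : Int → Nat) (v : Int)
    (hnd : fs.Nodup) :
    (fs.flatMap (fun f => List.replicate (c f) f)).count v =
      if v ∈ fs then c v else 0 := by
  induction fs with
  | nil => simp
  | cons f rest ih =>
    simp only [List.flatMap_cons, List.count_append, List.count_replicate,
      List.mem_cons]
    rcases List.nodup_cons.mp hnd with ⟨hf, hrest⟩
    rw [ih hrest]
    by_cases hv : v = f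
    · subst hv; simp [hf]
    · simp [hv, Ne.symm hv]

-- a flatMap of replicates over a strictly decreasing list is non-increasing
theorem pvPairwise_flatMap_replicate (fs : List Int) (c : Int → Nat)
    (h : fs.Pairwise (· > ·)) :
    (fs.flatMap (fun f => List.replicate (c f) f)).Pairwise (· ≥ ·) := by
  induction fs with
  | nil => simp
  | cons f rest ih =>
    rcases List.pairwise_cons.mp h with ⟨hf, hrest⟩
    simp only [List.flatMap_cons]
    apply List.pairwise_append.mpr
    refine ⟨List.pairwise_replicate.mpr (Or.inr le_rfl), ih hrest, ?_⟩
    intro a ha b hb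
    rcases List.eq_of_mem_replicate ha with rfl
    rcases List.mem_flatMap.mp hb with ⟨g, hg, hbg⟩
    have hbg' := List.eq_of_mem_replicate hbg
    subst hbg'
    exact le_of_lt (hf _ hg)

-- every multiplicity of an element of qs is at least 1
theorem pvValues_ge_one (qs : List Int) (v : Int)
    (hv : v ∈ (PySem.Dict.counter qs (κ := Int)).values) : 1 ≤ v := by
  have : (PySem.Dict.counter qs (κ := Int)).values
      = ((PySem.Set.ofList qs).map (fun k => ((qs.count k : Nat) : Int))) := by
    show ((PySem.Dict.counter qs (κ := Int)).items.map (·.2)) = _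
    rw [PySem.Dict.items_counter]
    simp
  rw [this] at hv
  rcases List.mem_map.mp hv with ⟨k, hk, rfl⟩
  have hkq : k ∈ qs := (PySem.Set.mem_ofList _ _).mp hk
  have h1 : 1 ≤ qs.count k := List.one_le_count_iff.mpr hkq
  omega

-- membership in B's sorted distinct-frequency list is membership in the multiplicity list
theorem pvMem_fs (values : List Int) (v : Int) :
    v ∈ PySem.List.sorted (PySem.Dict.counter values (κ := Int)).keys (fun x => x) true
      ↔ v ∈ values := by
  rw [PySem.List.mem_sorted, PySem.Dict.keys_counter]
  exact PySem.Set.mem_ofList _ _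

-- B's sorted distinct-frequency list is strictly decreasing
theorem pvFs_desc (values : List Int) :
    (PySem.List.sorted (PySem.Dict.counter values (κ := Int)).keys (fun x => x) true).Pairwise
      (· > ·) := by
  have hnd : (PySem.List.sorted (PySem.Dict.counter values (κ := Int)).keys
      (fun x => x) true).Nodup :=
    (PySem.List.sorted_perm _ _ _).symm.nodup (PySem.Dict.nodup_keys_counter values)
  have hge := PySem.List.sorted_pairwise_rev
    (PySem.Dict.counter values (κ := Int)).keys (fun x => x)
  exact (hge.and hnd).imp (fun {a b} h => lt_of_le_of_ne h.1 (Ne.symm h.2))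

-- the two count sequences coincide: values sorted descending = buckets consumed downward
theorem pvCounts_eq (qs : List Int) :
    ((PySem.List.sorted (PySem.Dict.counter qs (κ := Int)).items (fun p => p.2) true).map (·.2))
      = (PySem.List.sorted
            (PySem.Dict.counter (PySem.Dict.counter qs (κ := Int)).values).keys
            (fun x => x) true).flatMap
          (fun f => List.replicate
            ((PySem.Dict.counter (PySem.Dict.counter qs (κ := Int)).values).getD f 0).toNat f) := by
  set values := (PySem.Dict.counter qs (κ := Int)).values with hvals
  set fs := PySem.List.sorted (PySem.Dict.counter values).keys (fun x => x) true with hfs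
  set L1 := ((PySem.List.sorted (PySem.Dict.counter qs (κ := Int)).items (fun p => p.2) true).map (·.2)) with hL1
  set L2 := fs.flatMap
      (fun f => List.replicate ((PySem.Dict.counter values).getD f 0).toNat f) with hL2
  have hdesc : fs.Pairwise (· > ·) := pvFs_desc values
  have hnd : fs.Nodup := hdesc.imp (fun h => ne_of_gt h)
  -- L1 ~ values
  have hp1 : L1.Perm values := by
    have := PySem.List.sorted_perm (PySem.Dict.counter qs (κ := Int)).items (fun p => p.2) true
    exact this.map (·.2)
  -- L2 ~ values, by counts
  have hp2 : L2.Perm values := by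
    apply List.perm_iff_count.mpr
    intro v
    rw [hL2, pvCount_flatMap_replicate _ _ _ hnd]
    have hbv : ((PySem.Dict.counter values).getD v 0) = (values.count v : Int) :=
      PySem.Dict.getD_counter values v
    by_cases hv : v ∈ fs
    · simp only [hv, if_true, hbv, Int.toNat_natCast]
    · simp only [hv, if_false]
      have : v ∉ values := fun hm => hv ((pvMem_fs values v).mpr hm)
      exact (List.count_eq_zero.mpr this).symm
  -- both non-increasing
  have hs1 : L1.Pairwise (· ≥ ·) := by
    have := PySem.List.sorted_pairwise_rev (PySem.Dict.counter qs (κ := Int)).items (fun p => p.2)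
    rw [hL1]
    exact List.pairwise_map.mpr (this.imp (fun h => h))
  have hs2 : L2.Pairwise (· ≥ ·) :=
    pvPairwise_flatMap_replicate _ _ hdesc
  exact (hp1.trans hp2.symm).eq_of_pairwise
    (fun a b _ _ hab hba => le_antisymm hba hab) hs1 hs2

-- ===== VERDICT (by name: the statement is the Claim_ definition above) =====
theorem halfQuestions_spec : Claim_equal_halfQuestions := by
  intro qs _
  show halfQuestions qs = halfQuestions_alt qs
  unfold halfQuestions halfQuestions_alt
  rw [pvLoopA_eq_run]
  rw [pvOuterB_eq_run _ _ _ _ ?side]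
  case side =>
    intro f hf
    have hfv : f ∈ (PySem.Dict.counter qs (κ := Int)).values :=
      (pvMem_fs _ f).mp hf
    refine ⟨pvValues_ge_one qs f hfv, ?_⟩
    rw [PySem.Dict.getD_counter]
    have : 1 ≤ (PySem.Dict.counter qs (κ := Int)).values.count f :=
      List.one_le_count_iff.mpr hfv
    omega
  rw [pvCounts_eq]
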